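-- pv_equiv track=rewrite | github.com/EmilianoGrimaldi/Stark-Desafio-03 | stark_03.py | extraer_iniciales
-- ===== SOURCE A (Python) =====
-- def extraer_iniciales(nombre_heroe:str)->str:
--     """Se encarga de extraer las iniciales del nombre de un heroe, si contiene el articulo "the"
--     se quitara, si contiene "-" se reemplazara por un espacio
--
--     Args:
--         nombre_heroe (str): El string con el nombre del heroe
--
--     Returns:
--         str: El nombre del heroe formateado con las iniciales, en caso de ser un string vacio devolvera "N/A"
--     """
--     if type(nombre_heroe) == str and len(nombre_heroe) > 0:
--
--         partes_nombre = nombre_heroe.split()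
--         nombre_sin_articulo = ""
--         iniciales = ""
--         for palabra in partes_nombre:
--             if palabra == "the" or palabra == "The":
--                 palabra = " "
--
--             nombre_sin_articulo += palabra
--
--         for letra in nombre_sin_articulo:
--             if letra == "-":
--                 letra = " "
--
--             if letra >= "A" and letra <= "Z":
--                 iniciales += letra + "."
--
--         nombre_actualizado = iniciales.strip()
--
--         return nombre_actualizado
--
--     else:
--         return "N/A"
-- ===== SOURCE B (Python) =====
-- def _flush(word):
--     """Emit the initials contributed by one completed word (none for the article 'The';
--     lowercase 'the' contributes nothing anyway since it has no uppercase letters)."""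
--     if word == list("The"):
--         return []
--     return [c + "." for c in word if "A" <= c <= "Z"]
--
--
-- def extraer_iniciales(nombre_heroe: str) -> str:
--     # Single-pass state machine over the characters: a word buffer is flushed at each
--     # whitespace boundary, instead of A's split()/rebuild/rescan/strip pipeline.
--     if type(nombre_heroe) == str and len(nombre_heroe) > 0:
--         out = []
--         word = []
--         for c in nombre_heroe:
--             if c.isspace():
--                 out += _flush(word)
--                 word = []
--             else:
--                 word.append(c)
--         return "".join(out + _flush(word))
--     else:
--         return "N/A"
-- ===== Notes on version B (the rewrite author's own statement) =====
-- stated objective: simpler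
-- what changed: B replaces A's staged pipeline (split() into words, a loop rebuilding the name with 'the'/'The' replaced, a second char loop over the rebuilt string with dash handling, final strip) by a single pass over the original characters: a state machine with a word buffer flushed at each whitespace boundary, never materialising the split list or the rebuilt string.
import Mathlib
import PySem

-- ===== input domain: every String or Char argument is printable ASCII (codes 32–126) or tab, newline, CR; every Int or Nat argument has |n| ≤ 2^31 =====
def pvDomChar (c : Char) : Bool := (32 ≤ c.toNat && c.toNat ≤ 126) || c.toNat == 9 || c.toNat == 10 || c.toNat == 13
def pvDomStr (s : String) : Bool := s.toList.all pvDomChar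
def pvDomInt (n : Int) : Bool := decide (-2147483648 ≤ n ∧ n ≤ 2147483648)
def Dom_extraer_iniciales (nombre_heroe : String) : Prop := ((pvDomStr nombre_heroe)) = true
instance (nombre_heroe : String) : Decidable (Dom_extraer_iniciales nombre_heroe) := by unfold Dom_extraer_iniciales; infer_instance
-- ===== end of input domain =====

-- B replaces A's staged pipeline (split, word loop rebuilding the name, char loop over the
-- rebuilt string, strip) by a single-pass state machine with a word buffer; objective: simpler.


-- ===== PORT A =====
-- Literal transliteration of A on the List Char side (PySem.Chars): split, word loop
-- rebuilding the name ("the"/"The" → " "), char loop collecting uppercase letters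
-- ('-' replaced by a space), final strip.
def extraer_iniciales (nombre_heroe : String) : String :=
  if PySem.Str.len nombre_heroe > 0 then
    let partes_nombre := PySem.Chars.split₀ nombre_heroe.toList
    let nombre_sin_articulo := partes_nombre.foldl (fun acc palabra =>
      let palabra := if palabra = "the".toList ∨ palabra = "The".toList then [' '] else palabra
      acc ++ palabra) []
    let iniciales := nombre_sin_articulo.foldl (fun acc letra =>
      let letra := if letra = '-' then ' ' else letra
      if 'A' ≤ letra ∧ letra ≤ 'Z' then acc ++ [letra, '.'] else acc) []
    String.ofList (PySem.Chars.strip iniciales)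
  else "N/A"

-- ===== PORT B =====
-- Source B's _flush: the initials contributed by one completed word.
def pvFlush (word : List Char) : List Char :=
  if word = "The".toList then []
  else (word.filter (fun c => 'A' ≤ c ∧ c ≤ 'Z')).flatMap (fun c => [c, '.'])

-- Source B's loop body: flush the word buffer at whitespace, otherwise extend it.
def pvStep (st : List Char × List Char) (c : Char) : List Char × List Char :=
  if PySem.Chars.isspace c then (st.1 ++ pvFlush st.2, [])
  else (st.1, st.2 ++ [c])

-- Literal transliteration of Source B: one pass over the characters with an (out, word) state,
-- then a final flush of the last word.
def extraer_iniciales_alt (nombre_heroe : String) : String :=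
  if PySem.Str.len nombre_heroe > 0 then
    let st := nombre_heroe.toList.foldl pvStep ([], [])
    String.ofList (st.1 ++ pvFlush st.2)
  else "N/A"

-- ===== PRECONDITION & SPEC =====
def Spec_extraer_iniciales (nombre_heroe : String) (out : String) : Prop := out = extraer_iniciales_alt nombre_heroe
instance (nombre_heroe : String) (out : String) : Decidable (Spec_extraer_iniciales nombre_heroe out) := by unfold Spec_extraer_iniciales; infer_instance

-- ===== CLAIM (what is proved, stated in full; the proofs are below) =====
def Claim_equal_extraer_iniciales : Prop := ∀ (nombre_heroe : String), Dom_extraer_iniciales nombre_heroe → Spec_extraer_iniciales nombre_heroe (extraer_iniciales nombre_heroe)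

-- ===== LEMMAS AND PROOFS =====

-- g: what one character contributes in A's char loop.
def pvG (c : Char) : List Char := if 'A' ≤ c ∧ c ≤ 'Z' then [c, '.'] else []

-- A's char loop is a flatMap of pvG (the '-' → ' ' rewrite never survives the uppercase test).
theorem pvCharLoop (cs : List Char) (acc : List Char) :
    cs.foldl (fun acc letra =>
      let letra := if letra = '-' then ' ' else letra
      if 'A' ≤ letra ∧ letra ≤ 'Z' then acc ++ [letra, '.'] else acc) acc
    = acc ++ cs.flatMap pvG := by
  induction cs generalizing acc with
  | nil => simp
  | cons c cs ih =>
    simp only [List.foldl_cons, List.flatMap_cons, ih, pvG]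
    by_cases hd : c = '-'
    · subst hd; simp
    · simp only [if_neg hd]
      by_cases hu : 'A' ≤ c ∧ c ≤ 'Z' <;> simp [hu]

-- A's word loop is a flatMap.
theorem pvWordLoop (ws : List (List Char)) (acc : List Char) :
    ws.foldl (fun acc palabra =>
      let palabra := if palabra = "the".toList ∨ palabra = "The".toList then [' '] else palabra
      acc ++ palabra) acc
    = acc ++ ws.flatMap (fun w => if w = "the".toList ∨ w = "The".toList then [' '] else w) := by
  induction ws generalizing acc with
  | nil => simp
  | cons w ws ih => simp only [List.foldl_cons, List.flatMap_cons, ih]; split <;> simp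

-- per character: pvG is the filtered two-character contribution
theorem pvFlatG (w : List Char) :
    w.flatMap pvG
    = (w.filter (fun c => 'A' ≤ c ∧ c ≤ 'Z')).flatMap (fun c => [c, '.']) := by
  induction w with
  | nil => rfl
  | cons c cs ih =>
    by_cases hu : 'A' ≤ c ∧ c ≤ 'Z' <;>
      simp [pvG, hu, ih]

-- per word, A's contribution equals B's flush
theorem pvWordContrib (w : List Char) :
    (if w = "the".toList ∨ w = "The".toList then [' '] else w).flatMap pvG
    = pvFlush w := by
  unfold pvFlush
  by_cases h1 : w = "The".toList
  · subst h1; decide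
  · by_cases h2 : w = "the".toList
    · subst h2; decide
    · simp only [h1, h2, or_self, if_false]
      exact pvFlatG w

-- an uppercase letter and '.' are not Python whitespace
theorem pvNotSpace (c c' : Char) (h : c ∈ pvG c') : PySem.Chars.isspace c = false := by
  unfold pvG at h
  split at h
  · rename_i hu
    rcases List.mem_pair.mp h with rfl | rfl
    · obtain ⟨h1, h2⟩ := hu
      rw [Char.le_def, UInt32.le_iff_toNat_le] at h1 h2
      have e1 : 'A'.val.toNat = 65 := rfl
      have e2 : 'Z'.val.toNat = 90 := rfl
      simp only [PySem.Chars.isspace, Char.toNat]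
      rw [e1] at h1; rw [e2] at h2
      simp only [Bool.or_eq_false_iff, Bool.and_eq_false_iff, decide_eq_false_iff_not]
      omega
    · decide
  · simp at h

-- strip is the identity on a whitespace-free list
theorem pvDropId (l : List Char) (hl : ∀ c ∈ l, PySem.Chars.isspace c = false) :
    List.dropWhile PySem.Chars.isspace l = l := by
  rw [List.dropWhile_eq_self_iff]
  intro hp
  simp only [Bool.not_eq_true]
  exact hl _ (List.getElem_mem hp)

theorem pvStripId (cs : List Char) (h : ∀ c ∈ cs, PySem.Chars.isspace c = false) :
    PySem.Chars.strip cs = cs := by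
  unfold PySem.Chars.strip PySem.Chars.lstrip PySem.Chars.rstrip
  rw [pvDropId cs h, pvDropId, List.reverse_reverse]
  intro c hc
  exact h _ (List.mem_reverse.mp hc)

-- split₀.go's accumulator just prepends its reversed contents
theorem pvGoAcc (cs : List Char) (cur : List Char) (acc : List (List Char)) :
    PySem.Chars.split₀.go cs cur acc = acc.reverse ++ PySem.Chars.split₀.go cs cur [] := by
  induction cs generalizing cur acc with
  | nil =>
    unfold PySem.Chars.split₀.go
    by_cases h : cur.isEmpty = true <;> simp [h]
  | cons c cs ih =>
    unfold PySem.Chars.split₀.go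
    by_cases hs : PySem.Chars.isspace c = true
    · rw [if_pos hs, if_pos hs]
      by_cases he : cur.isEmpty = true
      · rw [if_pos he, if_pos he]; exact ih [] acc
      · rw [if_neg he, if_neg he, ih [] (cur.reverse :: acc), ih [] [cur.reverse]]
        simp
    · rw [if_neg hs, if_neg hs]; exact ih (c :: cur) acc

-- the state machine computes the flushed words of split₀'s continuation
theorem pvMachine (cs : List Char) (out w : List Char) :
    (cs.foldl pvStep (out, w)).1 ++ pvFlush (cs.foldl pvStep (out, w)).2
    = out ++ (PySem.Chars.split₀.go cs w.reverse []).flatMap pvFlush := by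
  induction cs generalizing out w with
  | nil =>
    unfold PySem.Chars.split₀.go
    by_cases h : w = []
    · subst h; simp [pvFlush]
    · have hne : ¬ w.reverse.isEmpty = true := by simp [h]
      rw [if_neg hne]; simp
  | cons c cs ih =>
    unfold PySem.Chars.split₀.go
    by_cases hs : PySem.Chars.isspace c = true
    · simp only [List.foldl_cons, pvStep, if_pos hs]
      by_cases h : w = []
      · subst h
        rw [if_pos (by simp : (List.reverse ([] : List Char)).isEmpty = true)]
        simpa [pvFlush] using ih (out ++ pvFlush []) []
      · rw [if_neg (by simp [h] : ¬ (w.reverse.isEmpty = true)),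
          pvGoAcc cs [] [w.reverse.reverse], ih (out ++ pvFlush w) []]
        simp
    · simp only [List.foldl_cons, pvStep, if_neg hs]
      rw [ih out (w ++ [c])]
      simp

-- ===== VERDICT (by name: the statement is the Claim_ definition above) =====
theorem extraer_iniciales_spec : Claim_equal_extraer_iniciales := by
  intro s _
  unfold Spec_extraer_iniciales extraer_iniciales extraer_iniciales_alt
  split_ifs with hlen
  · simp only [pvWordLoop, pvCharLoop, List.nil_append, List.flatMap_assoc]
    rw [pvStripId]
    · have hm := pvMachine s.toList [] []
      simp only [List.nil_append, List.reverse_nil] at hm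
      rw [hm]
      congr 1
      show (PySem.Chars.split₀ s.toList).flatMap _ = (PySem.Chars.split₀.go s.toList [] []).flatMap pvFlush
      unfold PySem.Chars.split₀
      exact List.flatMap_congr (fun w _ => pvWordContrib w)
    · intro c hc
      rw [List.mem_flatMap] at hc
      obtain ⟨w, _, hcw⟩ := hc
      rw [List.mem_flatMap] at hcw
      obtain ⟨c', _, hcg⟩ := hcw
      exact pvNotSpace c c' hcg
  · rfl
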